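-- pv_equiv track=rewrite | github.com/karasinarusi/codewars_training | did_you_mean.py | _get_max_the_same_order
-- ===== SOURCE A (Python) =====
-- import typing
--
-- def _get_max_the_same_order(
--     symbol_firstmilar_posymbol_firsttion_list: typing.List
-- ) -> int:
--     if len(symbol_firstmilar_posymbol_firsttion_list) == 0:
--         return 0
--     old_pos_diff = 0
--     the_same_order_count = 0
--     max_the_same_order_count = 1
--     for term_index, word_index in symbol_firstmilar_posymbol_firsttion_list:
--         pos_diff = word_index - term_index
--         if pos_diff == old_pos_diff:
--             the_same_order_count += 1
--             if the_same_order_count > max_the_same_order_count: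
--                 max_the_same_order_count = the_same_order_count
--         else:
--             the_same_order_count = 1
--         old_pos_diff = pos_diff
--
--     return max_the_same_order_count
-- ===== SOURCE B (Python) =====
-- import typing
--
--
-- def _leading_run(ds: typing.List) -> int:
--     # length of the maximal constant prefix of ds
--     n = 1
--     for x in ds[1:]:
--         if x != ds[0]:
--             break
--         n += 1
--     return n
--
--
-- def _get_max_the_same_order(
--     symbol_firstmilar_posymbol_firsttion_list: typing.List
-- ) -> int:
--     if not symbol_firstmilar_posymbol_firsttion_list:
--         return 0
--     diffs = [word_index - term_index
--              for term_index, word_index in symbol_firstmilar_posymbol_firsttion_list]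
--     return max(_leading_run(diffs[i:]) for i in range(len(diffs)))
-- ===== Notes on version B (the rewrite author's own statement) =====
-- stated objective: alternative
-- what changed: Replaced A's single fused pass with a running counter and running maximum by a brute-force formulation: for every start position take the suffix of the position-difference list and measure its constant leading prefix, then return the maximum over all start positions (quadratic, no run state carried between positions).
import Mathlib
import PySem

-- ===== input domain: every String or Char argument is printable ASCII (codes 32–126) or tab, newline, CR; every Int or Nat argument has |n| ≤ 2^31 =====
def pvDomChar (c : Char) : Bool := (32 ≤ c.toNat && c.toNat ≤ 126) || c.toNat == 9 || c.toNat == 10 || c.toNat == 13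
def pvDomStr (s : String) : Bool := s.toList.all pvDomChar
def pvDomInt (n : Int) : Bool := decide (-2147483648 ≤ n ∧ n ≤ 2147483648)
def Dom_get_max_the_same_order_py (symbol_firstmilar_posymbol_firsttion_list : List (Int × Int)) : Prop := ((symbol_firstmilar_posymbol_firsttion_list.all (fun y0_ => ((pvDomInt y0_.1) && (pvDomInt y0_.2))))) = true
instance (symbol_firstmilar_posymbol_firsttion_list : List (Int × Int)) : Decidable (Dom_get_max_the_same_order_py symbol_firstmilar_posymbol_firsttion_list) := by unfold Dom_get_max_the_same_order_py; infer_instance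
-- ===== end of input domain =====

-- B replaces A's fused counter-and-max pass by a brute-force formulation: the max over
-- every start position of the constant-leading-prefix length of that diff suffix.

-- ===== PORT A =====
-- A's for-loop over the pairs, state = (old_pos_diff, the_same_order_count, max_the_same_order_count)
def pvLoopA : List (Int × Int) → Int → Int → Int → Int
  | [], _, _, maxc => maxc
  | (t, w) :: rest, old, cnt, maxc =>
    let d := w - t
    if d = old then
      let c := cnt + 1
      pvLoopA rest d c (if c > maxc then c else maxc)
    else
      pvLoopA rest d 1 maxc

def get_max_the_same_order_py (symbol_firstmilar_posymbol_firsttion_list : List (Int × Int)) : Int :=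
  if symbol_firstmilar_posymbol_firsttion_list.length = 0 then 0
  else pvLoopA symbol_firstmilar_posymbol_firsttion_list 0 0 1

-- ===== PORT B =====
-- _leading_run's for-loop over ds[1:], counting while elements equal ds[0], break otherwise
def pvExt (v : Int) : List Int → Int
  | [] => 0
  | x :: xs => if x = v then 1 + pvExt v xs else 0

def pvLead : List Int → Int
  | [] => 1
  | d :: rest => 1 + pvExt d rest

-- Python's max over the (nonempty) generator; [] case unreachable in B
def pvMaxList : List Int → Int
  | [] => 0
  | x :: xs => xs.foldl max x

def get_max_the_same_order_py_alt (symbol_firstmilar_posymbol_firsttion_list : List (Int × Int)) : Int :=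
  if symbol_firstmilar_posymbol_firsttion_list = [] then 0
  else
    let diffs := symbol_firstmilar_posymbol_firsttion_list.map (fun p => p.2 - p.1)
    pvMaxList ((List.range diffs.length).map (fun i => pvLead (diffs.drop i)))

-- ===== PRECONDITION & SPEC =====
def Spec_get_max_the_same_order_py (symbol_firstmilar_posymbol_firsttion_list : List (Int × Int)) (out : Int) : Prop := out = get_max_the_same_order_py_alt symbol_firstmilar_posymbol_firsttion_list
instance (symbol_firstmilar_posymbol_firsttion_list : List (Int × Int)) (out : Int) : Decidable (Spec_get_max_the_same_order_py symbol_firstmilar_posymbol_firsttion_list out) := by unfold Spec_get_max_the_same_order_py; infer_instance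

-- ===== CLAIM (what is proved, stated in full; the proofs are below) =====
def Claim_equal_get_max_the_same_order_py : Prop := ∀ (symbol_firstmilar_posymbol_firsttion_list : List (Int × Int)), Dom_get_max_the_same_order_py symbol_firstmilar_posymbol_firsttion_list → Spec_get_max_the_same_order_py symbol_firstmilar_posymbol_firsttion_list (get_max_the_same_order_py symbol_firstmilar_posymbol_firsttion_list)

-- ===== LEMMAS AND PROOFS =====

-- max over all nonempty suffixes of the leading-run length (the common value of A and B)
def pvMsuf : List Int → Int
  | [] => 0
  | d :: ds => max (1 + pvExt d ds) (pvMsuf ds)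

theorem pvExt_nonneg (ds : List Int) (v : Int) : 0 ≤ pvExt v ds := by
  induction ds generalizing v with
  | nil => simp [pvExt]
  | cons x xs ih => simp only [pvExt]; split <;> [linarith [ih v]; exact le_rfl]

theorem pvMsuf_nonneg (ds : List Int) : 0 ≤ pvMsuf ds := by
  induction ds with
  | nil => simp [pvMsuf]
  | cons d t ih => simp only [pvMsuf]; have := pvExt_nonneg t d; omega

-- A's recorded-max helper: the max run length ever *recorded* while continuing a
-- current run of value old with count cnt (0 if nothing further is recorded).
def pvG (old cnt : Int) : List Int → Int
  | [] => 0
  | d :: ds => if d = old then max (cnt + 1) (pvG d (cnt + 1) ds) else max 1 (pvG d 1 ds)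

theorem pvLoopA_eq (l : List (Int × Int)) (old cnt best : Int) (hb : 1 ≤ best) :
    pvLoopA l old cnt best = max best (pvG old cnt (l.map (fun p => p.2 - p.1))) := by
  induction l generalizing old cnt best with
  | nil =>
    simp only [pvLoopA, List.map_nil, pvG]
    omega
  | cons p rest ih =>
    obtain ⟨t, w⟩ := p
    simp only [pvLoopA, List.map_cons, pvG]
    by_cases h : w - t = old
    · simp only [h, reduceIte]
      have hif : (if cnt + 1 > best then cnt + 1 else best) = max best (cnt + 1) := by omega
      rw [hif, ih _ _ _ (le_max_of_le_left hb)]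
      omega
    · simp only [if_neg h]
      rw [ih _ _ _ hb]
      have h1 : 1 ≤ max 1 (pvG (w - t) 1 (rest.map (fun p => p.2 - p.1))) := le_max_left _ _
      omega

-- pvG in terms of pvMsuf
theorem pvG_eq (ds : List Int) (v cnt : Int) (hc : 0 ≤ cnt) :
    pvG v cnt ds = max (if 1 ≤ pvExt v ds then cnt + pvExt v ds else 0) (pvMsuf ds) := by
  induction ds generalizing v cnt with
  | nil => simp [pvG, pvExt, pvMsuf]
  | cons x xs ih =>
    simp only [pvG, pvExt, pvMsuf]
    by_cases h : x = v
    · subst h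
      rw [if_pos rfl, ih x (cnt + 1) (by omega)]
      have he := pvExt_nonneg xs x
      have hm := pvMsuf_nonneg xs
      by_cases h1 : 1 ≤ pvExt x xs <;> simp only [h1, if_pos] <;> omega
    · simp only [if_neg h]
      rw [ih x 1 (by omega)]
      have he := pvExt_nonneg xs x
      have hm := pvMsuf_nonneg xs
      by_cases h1 : 1 ≤ pvExt x xs <;> simp only [h1, if_pos] <;> omega

-- when the leading prefix of ds matches v, its length is one suffix's lead, so ≤ pvMsuf
theorem pvExt_le_Msuf (ds : List Int) (v : Int) (h : 1 ≤ pvExt v ds) :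
    pvExt v ds ≤ pvMsuf ds := by
  cases ds with
  | nil => simp [pvExt] at h
  | cons x xs =>
    simp only [pvExt] at h ⊢
    by_cases hx : x = v
    · subst hx
      rw [if_pos rfl] at h ⊢
      simp only [pvMsuf]
      omega
    · simp only [if_neg hx] at h; omega

theorem foldl_max_comm (l : List Int) (a b : Int) :
    l.foldl max (max a b) = max a (l.foldl max b) := by
  induction l generalizing b with
  | nil => simp
  | cons x xs ih => simp only [List.foldl_cons, max_assoc, ih]

theorem pvMaxList_cons2 (x y : Int) (l : List Int) :
    pvMaxList (x :: y :: l) = max x (pvMaxList (y :: l)) := by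
  simp only [pvMaxList, List.foldl_cons]
  exact foldl_max_comm l x y

-- B computes pvMsuf on nonempty lists
theorem pvAlt_eq_Msuf (ds : List Int) (h : ds ≠ []) :
    pvMaxList ((List.range ds.length).map (fun i => pvLead (ds.drop i))) = pvMsuf ds := by
  induction ds with
  | nil => exact absurd rfl h
  | cons d t ih =>
    rw [List.length_cons, List.range_succ_eq_map]
    simp only [List.map_cons, List.map_map, List.drop_zero]
    have hmap : (List.range t.length).map ((fun i => pvLead ((d :: t).drop i)) ∘ Nat.succ)
        = (List.range t.length).map (fun i => pvLead (t.drop i)) := by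
      apply List.map_congr_left
      intro i _
      simp [Function.comp, List.drop_succ_cons]
    rw [hmap]
    cases t with
    | nil => simp [pvMaxList, pvLead, pvMsuf, pvExt]
    | cons y ys =>
      have hne : (y :: ys : List Int) ≠ [] := by simp
      have hlen : (List.range (y :: ys).length).map (fun i => pvLead ((y :: ys).drop i)) ≠ [] := by
        simp [List.length_cons, List.range_succ_eq_map]
      obtain ⟨z, zs, hz⟩ := List.exists_cons_of_ne_nil hlen
      rw [hz, pvMaxList_cons2, ← hz, ih hne]
      simp [pvMsuf, pvLead]

-- ===== VERDICT (by name: the statement is the Claim_ definition above) =====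
theorem get_max_the_same_order_py_spec : Claim_equal_get_max_the_same_order_py := by
  intro l _
  unfold Spec_get_max_the_same_order_py get_max_the_same_order_py get_max_the_same_order_py_alt
  cases l with
  | nil => simp
  | cons p rest =>
    obtain ⟨t, w⟩ := p
    simp only [List.length_cons, reduceCtorEq, reduceIte, Nat.succ_ne_zero]
    rw [pvLoopA_eq _ _ _ _ le_rfl, pvG_eq _ _ _ le_rfl]
    rw [pvAlt_eq_Msuf _ (by simp)]
    set ds := ((t, w) :: rest).map (fun p => p.2 - p.1) with hds
    have hdsne : ds ≠ [] := by simp [hds]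
    have hM1 : 1 ≤ pvMsuf ds := by
      obtain ⟨z, zs, hz⟩ := List.exists_cons_of_ne_nil hdsne
      rw [hz]
      simp only [pvMsuf]
      have := pvExt_nonneg zs z
      have := pvMsuf_nonneg zs
      omega
    by_cases h1 : 1 ≤ pvExt 0 ds
    · have hb := pvExt_le_Msuf ds 0 h1
      simp only [if_pos h1]
      omega
    · simp only [if_neg h1]
      omega
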